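-- pv_equiv track=rewrite | github.com/michaelbarrera21/mihomo-multi-proxy | protonvpn_provider.py | _strip_signed_modulus
-- ===== SOURCE A (Python) =====
-- def _strip_signed_modulus(signed_modulus):
--     value = (signed_modulus or "").strip()
--     if "BEGIN PGP SIGNED MESSAGE" not in value:
--         return value
--
--     lines = value.replace("\r\n", "\n").split("\n")
--     body = []
--     in_body = False
--     for line in lines:
--         if line.startswith("-----BEGIN PGP SIGNATURE-----"):
--             break
--         if in_body:
--             body.append(line)
--             continue
--         if line == "":
--             in_body = True
--     return "\n".join(body).strip()
-- ===== SOURCE B (Python) =====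
-- def _strip_signed_modulus(signed_modulus):
--     value = (signed_modulus or "").strip()
--     if "BEGIN PGP SIGNED MESSAGE" not in value:
--         return value
--
--     lines = value.replace("\r\n", "\n").split("\n")
--     flags = [line.startswith("-----BEGIN PGP SIGNATURE-----") for line in lines]
--     cut = flags.index(True) if True in flags else len(lines)
--     head = lines[:cut]
--     body = head[head.index("") + 1:] if "" in head else []
--     return "\n".join(body).strip()
-- ===== Notes on version B (the rewrite author's own statement) =====
-- stated objective: alternative
-- what changed: Replaces the stateful per-line loop (break + in_body flag) with a declarative pipeline: compute the signature cut with index, slice the head, then slice past the first blank line with index; no loop state or break.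
import Mathlib
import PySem

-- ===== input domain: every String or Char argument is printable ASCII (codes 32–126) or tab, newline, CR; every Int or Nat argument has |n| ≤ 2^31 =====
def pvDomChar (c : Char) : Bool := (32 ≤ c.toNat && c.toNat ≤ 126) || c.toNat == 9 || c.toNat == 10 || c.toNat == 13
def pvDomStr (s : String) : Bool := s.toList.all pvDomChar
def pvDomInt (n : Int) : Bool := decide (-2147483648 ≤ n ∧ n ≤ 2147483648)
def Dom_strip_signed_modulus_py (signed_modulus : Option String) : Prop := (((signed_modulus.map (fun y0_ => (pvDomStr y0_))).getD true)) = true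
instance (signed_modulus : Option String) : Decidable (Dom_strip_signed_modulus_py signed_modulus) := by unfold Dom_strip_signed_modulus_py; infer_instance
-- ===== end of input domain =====

-- B replaces A's stateful per-line loop (in_body flag + break) with an index/slice pipeline; same cost, different decomposition.

-- ===== PORT A =====
-- A's for-loop with break and the in_body flag, as structural recursion over the lines.
def pvALoop (lines : List String) (body : List String) (in_body : Bool) : List String :=
  match lines with
  | [] => body
  | line :: rest =>
    if PySem.Str.startswith line "-----BEGIN PGP SIGNATURE-----" then body
    else if in_body then pvALoop rest (body ++ [line]) true
    else if line == "" then pvALoop rest body true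
    else pvALoop rest body false

def strip_signed_modulus_py (signed_modulus : Option String) : String :=
  let value := PySem.Str.strip (signed_modulus.getD "")   -- (signed_modulus or ""): the only falsy str is ""
  if PySem.Str.isIn "BEGIN PGP SIGNED MESSAGE" value = false then value
  else
    let lines := (PySem.Str.split? (PySem.Str.replace value "\r\n" "\n") "\n").getD []
    PySem.Str.strip (PySem.Str.join "\n" (pvALoop lines [] false))

-- ===== PORT B =====
def strip_signed_modulus_py_alt (signed_modulus : Option String) : String :=
  let value := PySem.Str.strip (signed_modulus.getD "")
  if PySem.Str.isIn "BEGIN PGP SIGNED MESSAGE" value = false then value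
  else
    let lines := (PySem.Str.split? (PySem.Str.replace value "\r\n" "\n") "\n").getD []
    let flags := lines.map (fun line => PySem.Str.startswith line "-----BEGIN PGP SIGNATURE-----")
    let cut : Nat := if flags.contains true then (PySem.List.index? flags true).getD 0 else lines.length
    let head := PySem.List.slice lines none (some (cut : Int))
    let body := if head.contains "" then
        PySem.List.slice head (some ((((PySem.List.index? head "").getD 0) + 1 : Nat) : Int)) none
      else []
    PySem.Str.strip (PySem.Str.join "\n" body)

-- ===== PRECONDITION & SPEC =====
def Spec_strip_signed_modulus_py (signed_modulus : Option String) (out : String) : Prop := out = strip_signed_modulus_py_alt signed_modulus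
instance (signed_modulus : Option String) (out : String) : Decidable (Spec_strip_signed_modulus_py signed_modulus out) := by unfold Spec_strip_signed_modulus_py; infer_instance

-- ===== CLAIM (what is proved, stated in full; the proofs are below) =====
def Claim_equal_strip_signed_modulus_py : Prop := ∀ (signed_modulus : Option String), Dom_strip_signed_modulus_py signed_modulus → Spec_strip_signed_modulus_py signed_modulus (strip_signed_modulus_py signed_modulus)

-- ===== LEMMAS AND PROOFS =====

-- the predicate "this line starts the signature block"
def pvSig (line : String) : Bool := PySem.Str.startswith line "-----BEGIN PGP SIGNATURE-----"

-- the common normal form of the body both programs compute from the list of lines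
def pvBlankCut (h : List String) : List String :=
  if h.contains "" then h.drop ((List.idxOf? "" h).getD 0 + 1) else []

-- A's loop once in_body is set: it collects every remaining line up to the signature line
theorem pvALoop_true (xs : List String) (acc : List String) :
    pvALoop xs acc true = acc ++ xs.takeWhile (fun l => !pvSig l) := by
  induction xs generalizing acc with
  | nil => simp [pvALoop]
  | cons l rest ih =>
    rw [pvALoop, show PySem.Str.startswith l "-----BEGIN PGP SIGNATURE-----" = pvSig l from rfl,
      List.takeWhile_cons]
    by_cases h : pvSig l = true
    · simp [h]
    · simp only [Bool.not_eq_true] at h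
      simp [h, ih]

-- A's loop from the initial state equals "cut at signature, then cut at first blank line"
theorem pvALoop_eq (xs : List String) :
    pvALoop xs [] false = pvBlankCut (xs.takeWhile (fun l => !pvSig l)) := by
  induction xs with
  | nil => simp [pvALoop, pvBlankCut]
  | cons l rest ih =>
    rw [pvALoop, show PySem.Str.startswith l "-----BEGIN PGP SIGNATURE-----" = pvSig l from rfl,
      List.takeWhile_cons]
    by_cases h : pvSig l = true
    · simp [h, pvBlankCut]
    · simp only [Bool.not_eq_true] at h
      by_cases hb : l = ""
      · subst hb
        simp only [h, Bool.false_eq_true, if_false, Bool.not_false, if_true, beq_self_eq_true]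
        rw [pvALoop_true, pvBlankCut]
        simp [List.idxOf?_cons]
      · have hb' : (l == "") = false := by simp [hb]
        simp only [h, Bool.false_eq_true, if_false, hb', Bool.not_false, if_true, ih]
        unfold pvBlankCut
        have hc : (l :: rest.takeWhile (fun l => !pvSig l)).contains ""
            = (rest.takeWhile (fun l => !pvSig l)).contains "" := by
          simp [hb]
        rw [hc]
        by_cases hm : (rest.takeWhile (fun l => !pvSig l)).contains "" = true
        · simp only [hm, if_true]
          have hx : List.idxOf? "" (l :: rest.takeWhile (fun l => !pvSig l))
              = (List.idxOf? "" (rest.takeWhile (fun l => !pvSig l))).map (· + 1) := by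
            rw [List.idxOf?_cons]; simp [hb]
          rw [hx]
          rcases hi : List.idxOf? "" (rest.takeWhile (fun l => !pvSig l)) with _ | i
          · exfalso
            have := List.isSome_idxOf?.2 (by simpa using hm)
            rw [hi] at this; simp at this
          · simp [List.drop_succ_cons]
        · have hm' : ¬ ("" ∈ rest.takeWhile (fun l => !pvSig l)) := by simpa using hm
          simp [hm']

-- B's cut: the filtered-index computation picks out takeWhile (not sig)
theorem pvHead_eq (xs : List String) :
    (List.take (if (xs.map pvSig).contains true then (PySem.List.index? (xs.map pvSig) true).getD 0 else xs.length) xs)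
      = xs.takeWhile (fun l => !pvSig l) := by
  induction xs with
  | nil => simp
  | cons l rest ih =>
    rw [List.takeWhile_cons, List.map_cons]
    by_cases h : pvSig l = true
    · have hc : (pvSig l :: rest.map pvSig).contains true = true := by
        rw [List.contains_cons]; simp [h]
      have h0 : List.idxOf? true (pvSig l :: rest.map pvSig) = some 0 := by
        rw [List.idxOf?_cons]; simp [h]
      rw [hc]
      simp only [PySem.List.index?, h0]
      simp [h]
    · simp only [Bool.not_eq_true] at h
      have hc : (pvSig l :: rest.map pvSig).contains true = (rest.map pvSig).contains true := by
        rw [List.contains_cons]; simp [h]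
      rw [hc]
      by_cases hm : (rest.map pvSig).contains true = true
      · have hmem : true ∈ rest.map pvSig := by simpa using hm
        rcases hi : List.idxOf? true (rest.map pvSig) with _ | i
        · exfalso
          have := List.isSome_idxOf?.2 hmem
          rw [hi] at this; simp at this
        · have hx : List.idxOf? true (pvSig l :: rest.map pvSig) = some (i + 1) := by
            rw [List.idxOf?_cons]; simp [h, hi]
          rw [hm, if_pos rfl] at ih
          simp only [PySem.List.index?, hi, Option.getD_some] at ih
          rw [hm, if_pos rfl]
          simp only [PySem.List.index?, hx, Option.getD_some, List.take_succ_cons, ih]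
          simp [h]
      · have hm2 : (rest.map pvSig).contains true = false := by
          exact Bool.eq_false_iff.2 (fun hx => hm hx)
        rw [hm2, if_neg (by simp)] at ih
        rw [hm2, if_neg (by simp)]
        simp only [List.length_cons, List.take_succ_cons, ih]
        simp [h]

-- B's blank-line step equals pvBlankCut
theorem pvBody_eq (h : List String) :
    (if h.contains "" then
        PySem.List.slice h (some ((((PySem.List.index? h "").getD 0) + 1 : Nat) : Int)) none
      else []) = pvBlankCut h := by
  unfold pvBlankCut
  by_cases hm : h.contains "" = true
  · simp only [hm, if_true]
    rw [PySem.List.slice_from h (by positivity)]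
    simp [PySem.List.index?]
  · have hm' : ¬ ("" ∈ h) := by simpa using hm
    simp [hm']

-- ===== VERDICT (by name: the statement is the Claim_ definition above) =====
theorem strip_signed_modulus_py_spec : Claim_equal_strip_signed_modulus_py := by
  intro signed_modulus _
  unfold Spec_strip_signed_modulus_py strip_signed_modulus_py strip_signed_modulus_py_alt
  simp only []
  by_cases hg : PySem.Str.isIn "BEGIN PGP SIGNED MESSAGE"
      (PySem.Str.strip (signed_modulus.getD "")) = false
  · rw [if_pos hg, if_pos hg]
  · rw [if_neg hg, if_neg hg]
    set lines := (PySem.Str.split? (PySem.Str.replace (PySem.Str.strip (signed_modulus.getD ""))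
      "\r\n" "\n") "\n").getD [] with hl
    refine congrArg (fun b => PySem.Str.strip (PySem.Str.join "\n" b)) ?_
    rw [pvALoop_eq,
      show (fun line => PySem.Str.startswith line "-----BEGIN PGP SIGNATURE-----") = pvSig from rfl,
      PySem.List.slice_to lines (b := ((if (lines.map pvSig).contains true then
        (PySem.List.index? (lines.map pvSig) true).getD 0 else lines.length : Nat) : Int))
        (by positivity),
      Int.toNat_natCast, pvHead_eq, pvBody_eq]
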